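-- pv_equiv track=rewrite | github.com/aaron5630/Cuatro-en-raya-version-consola | 07 cuatro_en_raya.py | revisar_diagonal_derecha
-- ===== SOURCE A (Python) =====
-- def revisar_diagonal_derecha(tablero, color):
--     """
--     Esta función revisa si existe una secuencia de 4 caracteres consecutivas en las diagonales derechas
--     del tablero, retornando un True si se cumple, o False si no.
--     Argumentos:
--     <tablero> El conjunto de caracteres donde va a iterar y revisar si hay 4 caracteres consecutivos.
--     <color> El caracter que va a revisar para retornar True si se encuentran 4 caraceteres seguidos.
--     return True || False
--     """
--     for i in range(len(tablero)-3):
--         for j in range(len(tablero[0])-3):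
--             contador=0
--             for escalera in range(4):
--                 if tablero[i+escalera][j+escalera]==color:
--                     contador+=1
--                 else:
--                     break
--             if contador==4:
--                 return True
--     return False
-- ===== SOURCE B (Python) =====
-- def revisar_diagonal_derecha(tablero, color):
--     """Run-counting over each down-right diagonal instead of testing a 4-cell
--     window at every position."""
--     n = len(tablero)
--     if n < 4:
--         return False
--     m = len(tablero[0])
--     if m < 4:
--         return False
--     starts = [(0, c) for c in range(m)] + [(r, 0) for r in range(1, n)]
--     for r, c in starts:
--         run = 0
--         while r < n and c < m:
--             if tablero[r][c] == color:
--                 run += 1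
--                 if run == 4:
--                     return True
--             else:
--                 run = 0
--             r += 1
--             c += 1
--     return False
-- ===== Notes on version B (the rewrite author's own statement) =====
-- stated objective: alternative
-- what changed: Instead of testing an independent 4-cell window at every (i,j), B walks each down-right diagonal once (starts on the top row and left column) keeping a running counter of consecutive matches that resets on mismatch and returns True when it reaches 4; Pre_ excludes ragged boards with >=4 rows and >=4 columns in row 0 where some row is shorter than row 0, on which A's raising-vs-returning depends accidentally on where its inner loop breaks.
import Mathlib
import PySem

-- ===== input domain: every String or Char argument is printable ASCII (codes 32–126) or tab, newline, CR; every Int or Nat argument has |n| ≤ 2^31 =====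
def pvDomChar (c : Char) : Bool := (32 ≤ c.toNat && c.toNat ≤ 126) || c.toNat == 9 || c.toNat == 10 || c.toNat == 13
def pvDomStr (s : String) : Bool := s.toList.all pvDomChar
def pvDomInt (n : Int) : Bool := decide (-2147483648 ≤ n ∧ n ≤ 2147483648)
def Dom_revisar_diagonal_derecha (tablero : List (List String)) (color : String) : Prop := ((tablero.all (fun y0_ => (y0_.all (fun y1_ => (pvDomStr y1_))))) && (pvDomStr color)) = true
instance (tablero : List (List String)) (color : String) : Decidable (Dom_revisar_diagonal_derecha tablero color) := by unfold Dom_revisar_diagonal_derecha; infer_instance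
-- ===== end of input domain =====

-- B replaces A's per-position 4-cell window test by a single run-counting walk
-- along each down-right diagonal (objective: alternative decomposition, same cost).

-- ===== PORT A =====
-- contador loop: 'for escalera in range(4): if match: contador+=1 else: break'
-- (state = (contador, broken); a none from pyGet? — Python IndexError, outside Pre_ — breaks)
def pvA_contador (tab : List (List String)) (color : String) (i j : Int) : Int :=
  ((PySem.List.pyRange 0 4 1).foldl
    (fun st esc =>
      if st.2 then st
      else if PySem.List.pyGet? ((PySem.List.pyGet? tab (i + esc)).getD []) (j + esc) = some color
        then (st.1 + 1, st.2)
        else (st.1, true))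
    ((0 : Int), false)).1

def revisar_diagonal_derecha (tablero : List (List String)) (color : String) : Bool :=
  (PySem.List.pyRange 0 ((tablero.length : Int) - 3) 1).any (fun i =>
    (PySem.List.pyRange 0 (((tablero.headD []).length : Int) - 3) 1).any (fun j =>
      pvA_contador tablero color i j == 4))

-- ===== PORT B =====
def pvCell (tab : List (List String)) (r c : Nat) : String :=
  (tab.getD r []).getD c ""

-- the 'while r < n and c < m' walk along one diagonal with the running counter
def pvB_walk (tab : List (List String)) (color : String) (n m r c run : Nat) : Bool :=
  if h : r < n ∧ c < m then
    if pvCell tab r c == color then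
      if run + 1 == 4 then true
      else pvB_walk tab color n m (r + 1) (c + 1) (run + 1)
    else pvB_walk tab color n m (r + 1) (c + 1) 0
  else false
termination_by n - r
decreasing_by all_goals omega

def revisar_diagonal_derecha_alt (tablero : List (List String)) (color : String) : Bool :=
  let n := tablero.length
  if n < 4 then false
  else
    let m := (tablero.headD []).length
    if m < 4 then false
    else
      let starts := (List.range m).map (fun c => ((0 : Nat), c)) ++
                    (List.range (n - 1)).map (fun r => (r + 1, (0 : Nat)))
      starts.any (fun s => pvB_walk tablero color n m s.1 s.2 0)

-- ===== PRECONDITION & SPEC =====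
-- Pre_ excludes ragged boards with ≥4 rows and ≥4 columns in row 0 on which some row is
-- shorter than row 0: there A raising IndexError vs returning depends accidentally on
-- where its inner loop breaks (it sometimes still returns; see the excluded examples).
def Pre_revisar_diagonal_derecha (tablero : List (List String)) (color : String) : Prop :=
  tablero.length < 4 ∨ (tablero.headD []).length < 4 ∨
    ∀ row ∈ tablero, (tablero.headD []).length ≤ row.length
instance (tablero : List (List String)) (color : String) : Decidable (Pre_revisar_diagonal_derecha tablero color) := by unfold Pre_revisar_diagonal_derecha; infer_instance

def pvWitness_revisar_diagonal_derecha : List (List String) × String :=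
  ([["R", "A", "R", "R"], ["A", "R", "R", "A"], ["A", "A", "R", "A"], ["A", "A", "A", "R"]], "R")

def Spec_revisar_diagonal_derecha (tablero : List (List String)) (color : String) (out : Bool) : Prop := out = revisar_diagonal_derecha_alt tablero color
instance (tablero : List (List String)) (color : String) (out : Bool) : Decidable (Spec_revisar_diagonal_derecha tablero color out) := by unfold Spec_revisar_diagonal_derecha; infer_instance

-- ===== CLAIM (what is proved, stated in full; the proofs are below) =====
def Claim_equal_revisar_diagonal_derecha : Prop := ∀ (tablero : List (List String)) (color : String), Dom_revisar_diagonal_derecha tablero color → Pre_revisar_diagonal_derecha tablero color → Spec_revisar_diagonal_derecha tablero color (revisar_diagonal_derecha tablero color)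

-- ===== LEMMAS AND PROOFS =====

-- a 4-in-a-row window starting at (i, j)
def pvWin (tab : List (List String)) (color : String) (i j : Nat) : Prop :=
  ∀ e < 4, pvCell tab (i + e) (j + e) = color

-- the common existence property both programs decide
def pvE (tab : List (List String)) (color : String) : Prop :=
  ∃ i j, i + 3 < tab.length ∧ j + 3 < (tab.headD []).length ∧ pvWin tab color i j

lemma pvB_walk_iff (tab : List (List String)) (color : String) (n m : Nat) :
    ∀ fuel r c run, n - r ≤ fuel → run ≤ 3 →
      (pvB_walk tab color n m r c run = true ↔
        ((r + (3 - run) < n ∧ c + (3 - run) < m ∧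
            ∀ e < 4 - run, pvCell tab (r + e) (c + e) = color)
          ∨ ∃ k, 1 ≤ k ∧ r + k + 3 < n ∧ c + k + 3 < m ∧ pvWin tab color (r + k) (c + k))) := by
  intro fuel
  induction fuel with
  | zero =>
    intro r c run hf _
    rw [pvB_walk]
    have hb : ¬ (r < n ∧ c < m) := by omega
    rw [dif_neg hb]
    simp only [Bool.false_eq_true, false_iff]
    rintro (⟨h1, _, _⟩ | ⟨k, _, h1, _, _⟩) <;> omega
  | succ fuel ih =>
    intro r c run hf hrun
    rw [pvB_walk]
    by_cases hb : r < n ∧ c < m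
    · rw [dif_pos hb]
      by_cases hc : pvCell tab r c = color
      · rw [if_pos (by simpa [beq_iff_eq] using hc)]
        by_cases h4 : run = 3
        · subst h4
          rw [if_pos (by decide)]
          simp only [true_iff]
          left
          refine ⟨by omega, by omega, ?_⟩
          intro e he
          interval_cases e
          simpa using hc
        · rw [if_neg (by simp; omega)]
          rw [ih (r + 1) (c + 1) (run + 1) (by omega) (by omega)]
          constructor
          · rintro (⟨h1, h2, h3⟩ | ⟨k, hk, h1, h2, h3⟩)
            · left
              refine ⟨by omega, by omega, ?_⟩
              intro e he
              match e, he with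
              | 0, _ => simpa using hc
              | e + 1, he =>
                have h := h3 e (by omega)
                have e1 : r + (e + 1) = r + 1 + e := by omega
                have e2 : c + (e + 1) = c + 1 + e := by omega
                rw [e1, e2]; exact h
            · right
              refine ⟨k + 1, by omega, by omega, by omega, ?_⟩
              intro e he
              have e1 : r + (k + 1) + e = r + 1 + k + e := by omega
              have e2 : c + (k + 1) + e = c + 1 + k + e := by omega
              rw [e1, e2]; exact h3 e he
          · rintro (⟨h1, h2, h3⟩ | ⟨k, hk, h1, h2, h3⟩)
            · left
              refine ⟨by omega, by omega, ?_⟩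
              intro e he
              have h := h3 (e + 1) (by omega)
              have e1 : r + 1 + e = r + (e + 1) := by omega
              have e2 : c + 1 + e = c + (e + 1) := by omega
              rw [e1, e2]; exact h
            · rcases Nat.lt_or_ge k 2 with hk2 | hk2
              · have hk1 : k = 1 := by omega
                subst hk1
                left
                refine ⟨by omega, by omega, ?_⟩
                intro e he
                have h := h3 e (by omega)
                have e1 : r + 1 + e = r + 1 + e := rfl
                exact h
              · right
                refine ⟨k - 1, by omega, by omega, by omega, ?_⟩
                intro e he
                have h := h3 e he
                have e1 : r + 1 + (k - 1) + e = r + k + e := by omega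
                have e2 : c + 1 + (k - 1) + e = c + k + e := by omega
                rw [e1, e2]; exact h
      · rw [if_neg (by simpa [beq_iff_eq] using hc)]
        rw [ih (r + 1) (c + 1) 0 (by omega) (by omega)]
        constructor
        · rintro (⟨h1, h2, h3⟩ | ⟨k, hk, h1, h2, h3⟩)
          · right
            exact ⟨1, by omega, by omega, by omega, fun e he => h3 e (by omega)⟩
          · right
            refine ⟨k + 1, by omega, by omega, by omega, ?_⟩
            intro e he
            have e1 : r + (k + 1) + e = r + 1 + k + e := by omega
            have e2 : c + (k + 1) + e = c + 1 + k + e := by omega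
            rw [e1, e2]; exact h3 e he
        · rintro (⟨h1, h2, h3⟩ | ⟨k, hk, h1, h2, h3⟩)
          · exact absurd (by simpa using h3 0 (by omega)) hc
          · rcases Nat.lt_or_ge k 2 with hk2 | hk2
            · have hk1 : k = 1 := by omega
              subst hk1
              left
              refine ⟨by omega, by omega, ?_⟩
              intro e he
              exact h3 e (by omega)
            · right
              refine ⟨k - 1, by omega, by omega, by omega, ?_⟩
              intro e he
              have h := h3 e he
              have e1 : r + 1 + (k - 1) + e = r + k + e := by omega
              have e2 : c + 1 + (k - 1) + e = c + k + e := by omega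
              rw [e1, e2]; exact h
    · rw [dif_neg hb]
      simp only [Bool.false_eq_true, false_iff]
      rintro (⟨h1, h2, _⟩ | ⟨k, _, h1, h2, _⟩) <;> omega

lemma pvB_walk0_iff (tab : List (List String)) (color : String) (n m r c : Nat) :
    pvB_walk tab color n m r c 0 = true ↔
      ∃ k, r + k + 3 < n ∧ c + k + 3 < m ∧ pvWin tab color (r + k) (c + k) := by
  rw [pvB_walk_iff tab color n m (n - r) r c 0 le_rfl (by omega)]
  constructor
  · rintro (⟨h1, h2, h3⟩ | ⟨k, _, h1, h2, h3⟩)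
    · exact ⟨0, by omega, by omega, fun e he => by simpa using h3 e (by omega)⟩
    · exact ⟨k, h1, h2, h3⟩
  · rintro ⟨k, h1, h2, h3⟩
    rcases Nat.eq_zero_or_pos k with hk | hk
    · subst hk
      left
      exact ⟨by omega, by omega, fun e he => by simpa using h3 e (by omega)⟩
    · exact Or.inr ⟨k, hk, h1, h2, h3⟩

lemma pvB_iff (tab : List (List String)) (color : String) :
    revisar_diagonal_derecha_alt tab color = true ↔ pvE tab color := by
  unfold revisar_diagonal_derecha_alt pvE
  by_cases h4 : tab.length < 4
  · rw [if_pos h4]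
    simp only [Bool.false_eq_true, false_iff]
    rintro ⟨i, j, h1, _⟩
    omega
  · rw [if_neg h4]
    by_cases hm4 : (tab.headD []).length < 4
    · rw [if_pos hm4]
      simp only [Bool.false_eq_true, false_iff]
      rintro ⟨i, j, _, h2, _⟩
      omega
    · rw [if_neg hm4]
      rw [List.any_eq_true]
      constructor
      · rintro ⟨s, hs, hw⟩
        rw [pvB_walk0_iff] at hw
        obtain ⟨k, h1, h2, h3⟩ := hw
        exact ⟨s.1 + k, s.2 + k, h1, h2, h3⟩
      · rintro ⟨i, j, hi, hj, hwin⟩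
        rcases Nat.le_total i j with hij | hij
        · refine ⟨(0, j - i), ?_, ?_⟩
          · apply List.mem_append_left
            exact List.mem_map.mpr ⟨j - i, List.mem_range.mpr (by omega), rfl⟩
          · rw [pvB_walk0_iff]
            refine ⟨i, by omega, by omega, ?_⟩
            intro e he
            have e1 : (0 : Nat) + i + e = i + e := by omega
            have e2 : j - i + i + e = j + e := by omega
            rw [e1, e2]
            exact hwin e he
        · refine ⟨(i - j, 0), ?_, ?_⟩
          · rcases Nat.eq_or_lt_of_le hij with hij' | hij'
            · apply List.mem_append_left
              have e0 : i - j = 0 := by omega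
              rw [e0]
              exact List.mem_map.mpr ⟨0, List.mem_range.mpr (by omega), rfl⟩
            · apply List.mem_append_right
              have e0 : i - j = (i - j - 1) + 1 := by omega
              rw [e0]
              exact List.mem_map.mpr ⟨i - j - 1, List.mem_range.mpr (by omega), rfl⟩
          · rw [pvB_walk0_iff]
            refine ⟨j, by omega, by omega, ?_⟩
            intro e he
            have e1 : i - j + j + e = i + e := by omega
            have e2 : (0 : Nat) + j + e = j + e := by omega
            rw [e1, e2]
            exact hwin e he

lemma pvGet2 (tab : List (List String)) (r c : Nat) (hr : r < tab.length)
    (hc : c < (tab[r]'hr).length) :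
    PySem.List.pyGet? ((PySem.List.pyGet? tab (r : Int)).getD []) (c : Int)
      = some (pvCell tab r c) := by
  have h1 : PySem.List.pyGet? tab (r : Int) = some (tab[r]'hr) := by
    rw [PySem.List.pyGet?_natCast, List.getElem?_eq_getElem hr]
  rw [h1]
  simp only [Option.getD_some]
  rw [PySem.List.pyGet?_natCast, List.getElem?_eq_getElem hc]
  unfold pvCell
  rw [List.getD_eq_getElem _ _ hr, List.getD_eq_getElem _ _ hc]

lemma pvContador_iff (tab : List (List String)) (color : String) (i j : Nat)
    (hi : i + 3 < tab.length)
    (hcol : ∀ row ∈ tab, (tab.headD []).length ≤ row.length)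
    (hj : j + 3 < (tab.headD []).length) :
    ((pvA_contador tab color (i : Int) (j : Int) == 4) = true ↔ pvWin tab color i j) := by
  have g : ∀ e : Nat, e < 4 →
      PySem.List.pyGet? ((PySem.List.pyGet? tab ((i : Int) + (e : Int))).getD []) ((j : Int) + (e : Int))
        = some (pvCell tab (i + e) (j + e)) := by
    intro e he
    have h1 : (i : Int) + (e : Int) = ((i + e : Nat) : Int) := by push_cast; ring
    have h2 : (j : Int) + (e : Int) = ((j + e : Nat) : Int) := by push_cast; ring
    rw [h1, h2]
    have hie : i + e < tab.length := by omega
    apply pvGet2 tab (i + e) (j + e) hie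
    have hmem : tab[i + e]'hie ∈ tab := List.getElem_mem hie
    have := hcol _ hmem
    omega
  have g0 := g 0 (by omega)
  have g1 := g 1 (by omega)
  have g2 := g 2 (by omega)
  have g3 := g 3 (by omega)
  norm_num at g0 g1 g2 g3
  have hr4 : PySem.List.pyRange 0 4 1 = [0, 1, 2, 3] := by decide
  have hwin : pvWin tab color i j ↔
      (pvCell tab i j = color ∧ pvCell tab (i + 1) (j + 1) = color ∧
        pvCell tab (i + 2) (j + 2) = color ∧ pvCell tab (i + 3) (j + 3) = color) := by
    constructor
    · intro h
      exact ⟨by simpa using h 0 (by omega), h 1 (by omega), h 2 (by omega), h 3 (by omega)⟩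
    · rintro ⟨ha, hb, hc, hd⟩ e he
      interval_cases e
      · simpa using ha
      · exact hb
      · exact hc
      · exact hd
  rw [hwin]
  unfold pvA_contador
  rw [hr4]
  simp only [List.foldl]
  norm_num
  rw [g0, g1, g2, g3]
  simp only [Option.some.injEq]
  by_cases h0 : pvCell tab i j = color <;>
    by_cases h1 : pvCell tab (i + 1) (j + 1) = color <;>
      by_cases h2 : pvCell tab (i + 2) (j + 2) = color <;>
        by_cases h3 : pvCell tab (i + 3) (j + 3) = color <;>
          simp [h0, h1, h2, h3]

lemma pvA_iff (tab : List (List String)) (color : String)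
    (hpre : Pre_revisar_diagonal_derecha tab color) :
    revisar_diagonal_derecha tab color = true ↔ pvE tab color := by
  unfold revisar_diagonal_derecha pvE
  rw [List.any_eq_true]
  constructor
  · rintro ⟨x, hx, hinner⟩
    rw [List.any_eq_true] at hinner
    obtain ⟨y, hy, hcond⟩ := hinner
    rw [PySem.List.mem_pyRange_one] at hx hy
    have hcol : ∀ row ∈ tab, (tab.headD []).length ≤ row.length := by
      rcases hpre with h | h | h
      · omega
      · omega
      · exact h
    have hx' : x = ((x.toNat : Nat) : Int) := by omega
    have hy' : y = ((y.toNat : Nat) : Int) := by omega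
    rw [hx', hy'] at hcond
    refine ⟨x.toNat, y.toNat, by omega, by omega, ?_⟩
    exact (pvContador_iff tab color x.toNat y.toNat (by omega) hcol (by omega)).mp hcond
  · rintro ⟨i, j, hi, hj, hwin⟩
    have hcol : ∀ row ∈ tab, (tab.headD []).length ≤ row.length := by
      rcases hpre with h | h | h
      · omega
      · omega
      · exact h
    refine ⟨(i : Int), ?_, ?_⟩
    · rw [PySem.List.mem_pyRange_one]
      omega
    · rw [List.any_eq_true]
      refine ⟨(j : Int), ?_, ?_⟩
      · rw [PySem.List.mem_pyRange_one]
        omega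
      · exact (pvContador_iff tab color i j hi hcol hj).mpr hwin

-- ===== VERDICT (by name: the statement is the Claim_ definition above) =====
theorem revisar_diagonal_derecha_spec : Claim_equal_revisar_diagonal_derecha := by
  intro tab color _ hpre
  unfold Spec_revisar_diagonal_derecha
  have hA := pvA_iff tab color hpre
  have hB := pvB_iff tab color
  cases hA' : revisar_diagonal_derecha tab color <;>
    cases hB' : revisar_diagonal_derecha_alt tab color <;> simp_all
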